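-- pv_equiv track=rewrite | github.com/terriellis120/financial | open_csv.py | separate_by_date
-- ===== SOURCE A (Python) =====
-- def separate_by_date(data):
--
--     separate_data = []
--     current_date = data[0][1].split()[0]
--     per_date_list = []
--     for items in data:
--         if items[1].split()[0] != current_date:
--             current_date = items[1].split()[0]
--             separate_data.append(per_date_list)
--             per_date_list = []
--         per_date_list.append(items)
--     separate_data.append(per_date_list)
--     return(separate_data)
--     pass
-- ===== SOURCE B (Python) =====
-- def separate_by_date(data):
--     groups = []
--     i = 0
--     n = len(data)
--     while i < n:
--         key = data[i][1].split()[0]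
--         j = i + 1
--         while j < n and data[j][1].split()[0] == key:
--             j += 1
--         groups.append(data[i:j])
--         i = j
--     return groups
-- ===== Notes on version B (the rewrite author's own statement) =====
-- stated objective: alternative
-- what changed: B replaces A's flush-on-change accumulator (current_date/per_date_list state threaded through one loop) by a two-pointer run scanner that finds each maximal run of equal date prefixes with an inner scan and slices it out in one step.
-- outside the precondition, e.g. on separate_by_date([]): A raises IndexError, B returns []
import Mathlib
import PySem

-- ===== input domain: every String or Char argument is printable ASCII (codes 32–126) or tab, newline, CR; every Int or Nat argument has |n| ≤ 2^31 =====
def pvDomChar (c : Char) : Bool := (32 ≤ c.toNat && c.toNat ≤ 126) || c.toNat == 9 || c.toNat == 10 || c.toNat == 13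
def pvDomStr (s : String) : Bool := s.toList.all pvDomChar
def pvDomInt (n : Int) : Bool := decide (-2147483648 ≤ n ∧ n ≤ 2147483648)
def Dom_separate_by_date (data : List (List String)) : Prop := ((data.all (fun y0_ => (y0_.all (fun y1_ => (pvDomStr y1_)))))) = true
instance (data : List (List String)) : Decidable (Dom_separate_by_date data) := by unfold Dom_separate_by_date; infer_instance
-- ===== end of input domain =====

-- B is an alternative, equally-fast implementation: a two-pointer run scanner instead of
-- A's flush-on-change accumulator loop.  Equivalence is proved on Pre_ (nonempty data,
-- every row has a position 1 whose string contains a word; elsewhere Python A raises).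

-- shared key expression `row[1].split()[0]` of both Pythons; the defaults are never
-- reached under Pre_ (row[1] exists and its split() is nonempty; Python raises otherwise)
def pvTok0 (row : List String) : String :=
  (PySem.Str.split₀ ((PySem.List.pyGet? row 1).getD "")).headD ""

-- ===== PORT A =====
-- loop state: (separate_data, current_date, per_date_list)
def sbdStep (st : List (List (List String)) × String × List (List String))
    (items : List String) : List (List (List String)) × String × List (List String) :=
  let (sep, cur, per) := st
  if pvTok0 items ≠ cur then (sep ++ [per], pvTok0 items, [items])
  else (sep, cur, per ++ [items])

def separate_by_date (data : List (List String)) : List (List (List String)) :=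
  let cur0 := pvTok0 ((PySem.List.pyGet? data 0).getD [])   -- data[0][1].split()[0]
  let st := data.foldl sbdStep ([], cur0, [])
  st.1 ++ [st.2.2]

-- ===== PORT B =====
-- inner while loop of Source B: length of the run of rows whose key equals `key`
def sbdRunLen (key : String) : List (List String) → Nat
  | [] => 0
  | x :: xs => if pvTok0 x == key then sbdRunLen key xs + 1 else 0

-- outer while loop of Source B: slice out each maximal run data[i:j]
def separate_by_date_alt : List (List String) → List (List (List String))
  | [] => []
  | x :: xs =>
      let j := sbdRunLen (pvTok0 x) xs
      (x :: xs.take j) :: separate_by_date_alt (xs.drop j)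
  termination_by l => l.length
  decreasing_by simp

-- ===== PRECONDITION & SPEC =====
-- Pre_ excludes exactly the inputs on which Python A raises: empty data (data[0]),
-- rows without a position 1 (items[1]) and rows whose items[1] splits to [] ([0]).
def Pre_separate_by_date (data : List (List String)) : Prop :=
  data ≠ [] ∧ ∀ row ∈ data, (PySem.List.pyGet? row 1).isSome = true ∧
    PySem.Str.split₀ ((PySem.List.pyGet? row 1).getD "") ≠ []
instance (data : List (List String)) : Decidable (Pre_separate_by_date data) := by
  unfold Pre_separate_by_date; infer_instance

def pvWitness_separate_by_date : List (List String) := [["a", "2020-01-01 10:00"], ["b", "2020-01-02 11:00"]]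

def Spec_separate_by_date (data : List (List String)) (out : List (List (List String))) : Prop := out = separate_by_date_alt data
instance (data : List (List String)) (out : List (List (List String))) : Decidable (Spec_separate_by_date data out) := by unfold Spec_separate_by_date; infer_instance

-- ===== CLAIM (what is proved, stated in full; the proofs are below) =====
def Claim_equal_separate_by_date : Prop := ∀ (data : List (List String)), Dom_separate_by_date data → Pre_separate_by_date data → Spec_separate_by_date data (separate_by_date data)

-- ===== LEMMAS AND PROOFS =====

-- recursive reformulation of A's fold
def sbdGo : List (List String) → String → List (List String) → List (List (List String))
  | [], _, per => [per]
  | x :: xs, k, per =>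
      if pvTok0 x ≠ k then per :: sbdGo xs (pvTok0 x) [x]
      else sbdGo xs k (per ++ [x])

lemma fold_eq_go (l : List (List String)) :
    ∀ (sep : List (List (List String))) (k : String) (per : List (List String)),
      (l.foldl sbdStep (sep, k, per)).1 ++ [(l.foldl sbdStep (sep, k, per)).2.2]
        = sep ++ sbdGo l k per := by
  induction l with
  | nil => intro sep k per; simp [sbdGo]
  | cons x xs ih =>
      intro sep k per
      by_cases h : pvTok0 x = k
      · simp [List.foldl_cons, sbdStep, sbdGo, h, ih]
      · simp [List.foldl_cons, sbdStep, sbdGo, h, ih]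

lemma go_eq_alt (xs : List (List String)) :
    ∀ (k : String) (per : List (List String)),
      sbdGo xs k per
        = (per ++ xs.take (sbdRunLen k xs)) :: separate_by_date_alt (xs.drop (sbdRunLen k xs)) := by
  induction xs with
  | nil => intro k per; simp [sbdGo, sbdRunLen, separate_by_date_alt.eq_def]
  | cons x xs ih =>
      intro k per
      by_cases h : pvTok0 x = k
      · simp only [sbdGo, h, ne_eq, not_true_eq_false, if_false, sbdRunLen, beq_self_eq_true,
          if_true, List.take_succ_cons, List.drop_succ_cons, ih]
        simp
      · simp only [sbdGo, h, ne_eq, not_false_eq_true, if_true, sbdRunLen, beq_iff_eq]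
        rw [separate_by_date_alt.eq_def, ih]
        simp

-- ===== VERDICT (by name: the statement is the Claim_ definition above) =====
theorem separate_by_date_spec : Claim_equal_separate_by_date := by
  intro data _ hpre
  obtain ⟨hne, -⟩ := hpre
  unfold Spec_separate_by_date separate_by_date
  cases data with
  | nil => exact absurd rfl hne
  | cons x xs =>
      simp only [fold_eq_go, List.nil_append]
      have h0 : (PySem.List.pyGet? (x :: xs) 0).getD [] = x := by
        simp [PySem.List.pyGet?, PySem.List.pyIdx?]
      rw [h0]
      show sbdGo (x :: xs) (pvTok0 x) [] = separate_by_date_alt (x :: xs)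
      rw [sbdGo]
      simp only [ne_eq, not_true_eq_false, if_false, List.nil_append]
      rw [go_eq_alt]
      conv_rhs => rw [separate_by_date_alt.eq_def]
      simp
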